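-- pv_equiv track=rewrite | github.com/misterwilliam/programming-pearls | column2/problemB.py | DoRotationCycle
-- ===== SOURCE A (Python) =====
-- def GetSource(index, length, rotationAmount):
--     return (index + rotationAmount) % length
--
-- def GetDest(index, length, rotationAmount):
--     return (index - rotationAmount) % length
--
-- def DoRotationCycle(vector, rotationAmount, start_index):
--     num_rotations = 1
--     swap = vector[start_index]
--     vector[start_index] = vector[GetSource(start_index, len(vector), rotationAmount)]
--     i = GetDest(start_index, len(vector), rotationAmount)
--     while i != start_index:
--         vector[i], swap = swap, vector[i]
--         i = GetDest(i, len(vector), rotationAmount)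
--         num_rotations += 1
--     return num_rotations
-- ===== SOURCE B (Python) =====
-- def DoRotationCycle(vector, rotationAmount, start_index):
--     # Forward "juggling" cycle: save the start element, then pull each element
--     # from its source (i + rotationAmount) until the cycle closes, finally drop
--     # the saved element into the last slot. Same in-place rotation and count as A.
--     temp = vector[start_index]
--     n = len(vector)
--     i = start_index
--     count = 1
--     while True:
--         j = (i + rotationAmount) % n
--         if j == start_index:
--             break
--         vector[i] = vector[j]
--         i = j
--         count += 1
--     vector[i] = temp
--     return count
-- ===== Notes on version B (the rewrite author's own statement) =====
-- stated objective: alternative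
-- what changed: Replaces A's backward swap-threading (carrying a 'swap' value and walking destinations (i - r) % n) with the forward juggling rotation: save the start element, walk sources (i + r) % n overwriting each slot from its source, and drop the saved element into the last slot; same count and same in-place rotation. (constant-factor: one overwrite per step instead of a swap that both reads and writes two values).
import Mathlib
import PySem

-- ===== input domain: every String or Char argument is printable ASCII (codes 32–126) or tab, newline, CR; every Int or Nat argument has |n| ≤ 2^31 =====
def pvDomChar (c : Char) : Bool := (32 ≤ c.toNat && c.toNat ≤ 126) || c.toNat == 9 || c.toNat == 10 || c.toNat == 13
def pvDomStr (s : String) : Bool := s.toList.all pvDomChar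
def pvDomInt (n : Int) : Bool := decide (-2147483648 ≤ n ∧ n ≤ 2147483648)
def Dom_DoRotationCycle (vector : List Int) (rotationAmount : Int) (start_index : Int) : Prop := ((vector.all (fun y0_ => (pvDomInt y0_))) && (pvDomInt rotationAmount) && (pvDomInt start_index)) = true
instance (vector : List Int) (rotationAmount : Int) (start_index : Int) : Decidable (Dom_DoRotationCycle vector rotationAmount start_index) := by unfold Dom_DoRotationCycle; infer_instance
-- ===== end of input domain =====

-- B replaces A's backward swap-threading with the forward juggling rotation (overwrite each
-- slot from its source, then drop the saved start element); same count, and both mutate the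
-- Python list in place to the same rotated array — the equivalence proved here is about the
-- RETURN value (the cycle length).

-- ===== PORT A =====
def pvGetSource (index length rotationAmount : Int) : Int :=
  PySem.Int.mod (index + rotationAmount) length

def pvGetDest (index length rotationAmount : Int) : Int :=
  PySem.Int.mod (index - rotationAmount) length

-- the while loop of A; fuel = len(vector) (the cycle closes after at most n steps);
-- vec/swap carry the (return-irrelevant) list state faithfully
def pvALoop (n r s : Int) (vec : List Int) (swap i cnt : Int) : Nat → Int
  | 0 => cnt
  | fuel + 1 =>
    if i = s then cnt
    else
      -- vector[i], swap = swap, vector[i]  (index i is in [0,n) here, so pyGetD/pySetD are exact)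
      let vi := PySem.List.pyGetD vec i 0
      let vec' := PySem.List.pySetD vec i swap
      pvALoop n r s vec' vi (pvGetDest i n r) (cnt + 1) fuel

def DoRotationCycle (vector : List Int) (rotationAmount : Int) (start_index : Int) : Int :=
  let n : Int := vector.length
  let swap := PySem.List.pyGetD vector start_index 0
  let vec1 := PySem.List.pySetD vector start_index
      (PySem.List.pyGetD vector (pvGetSource start_index n rotationAmount) 0)
  pvALoop n rotationAmount start_index vec1 swap
    (pvGetDest start_index n rotationAmount) 1 vector.length

-- ===== PORT B =====
-- the while True loop of Source B; fuel = len(vector) (the cycle closes after at most n steps)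
def pvBLoop (n r s : Int) (vec : List Int) (i cnt : Int) : Nat → Int
  | 0 => cnt
  | fuel + 1 =>
    let j := PySem.Int.mod (i + r) n
    if j = s then cnt
    else
      pvBLoop n r s (PySem.List.pySetD vec i (PySem.List.pyGetD vec j 0)) j (cnt + 1) fuel

def DoRotationCycle_alt (vector : List Int) (rotationAmount : Int) (start_index : Int) : Int :=
  let _temp := PySem.List.pyGetD vector start_index 0   -- temp = vector[start_index]; written back at the end (return-irrelevant)
  let n : Int := vector.length
  pvBLoop n rotationAmount start_index vector start_index 1 vector.length

-- ===== PRECONDITION & SPEC =====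
-- Pre_ excludes len(vector) = 0 and out-of-range start_index (IndexError in A) and negative
-- start_index (both loops compare a nonnegative residue with it, so A never returns).
def Pre_DoRotationCycle (vector : List Int) (rotationAmount : Int) (start_index : Int) : Prop :=
  0 ≤ start_index ∧ start_index < (vector.length : Int)

instance (vector : List Int) (rotationAmount : Int) (start_index : Int) : Decidable (Pre_DoRotationCycle vector rotationAmount start_index) := by unfold Pre_DoRotationCycle; infer_instance

def pvWitness_DoRotationCycle : List Int × Int × Int := ([1, 2, 3], 1, 0)

def Spec_DoRotationCycle (vector : List Int) (rotationAmount : Int) (start_index : Int) (out : Int) : Prop := out = DoRotationCycle_alt vector rotationAmount start_index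
instance (vector : List Int) (rotationAmount : Int) (start_index : Int) (out : Int) : Decidable (Spec_DoRotationCycle vector rotationAmount start_index out) := by unfold Spec_DoRotationCycle; infer_instance

-- ===== CLAIM (what is proved, stated in full; the proofs are below) =====
def Claim_equal_DoRotationCycle : Prop := ∀ (vector : List Int) (rotationAmount : Int) (start_index : Int), Dom_DoRotationCycle vector rotationAmount start_index → Pre_DoRotationCycle vector rotationAmount start_index → Spec_DoRotationCycle vector rotationAmount start_index (DoRotationCycle vector rotationAmount start_index)

-- ===== LEMMAS AND PROOFS =====

-- (a % n + b) % n = (a + b) % n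
lemma pvShift (a b n : Int) : (a % n + b) % n = (a + b) % n := by
  conv_rhs => rw [Int.add_emod]
  rw [Int.add_emod (a % n) b, Int.emod_emod_of_dvd _ dvd_rfl]

-- for 0 ≤ s < n : (s + t) % n = s ↔ n ∣ t
lemma pvCond (n s t : Int) (hs0 : 0 ≤ s) (hsn : s < n) : (s + t) % n = s ↔ n ∣ t := by
  have hs : s % n = s := Int.emod_eq_of_lt hs0 hsn
  rw [show ((s + t) % n = s) ↔ ((s + t) % n = s % n) by rw [hs],
    Int.emod_eq_emod_iff_emod_sub_eq_zero, show s + t - s = t by ring,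
    ← Int.dvd_iff_emod_eq_zero]

-- The two loops do the same sequence of termination tests (both test n ∣ k·r at step k),
-- so they return the same count, whatever list state each carries.
lemma pvLoop_agree (n r s : Int) (hn : 0 < n) (hs0 : 0 ≤ s) (hsn : s < n) :
    ∀ (fuel : Nat) (k cnt : Int) (vecA : List Int) (swapA : Int) (vecB : List Int), 1 ≤ k →
      pvALoop n r s vecA swapA ((s - k * r) % n) cnt fuel
        = pvBLoop n r s vecB ((s + (k - 1) * r) % n) cnt fuel := by
  intro fuel
  induction fuel with
  | zero => intro k cnt vecA swapA vecB _; rfl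
  | succ fuel ih =>
    intro k cnt vecA swapA vecB hk
    have hmod : ∀ a : Int, PySem.Int.mod a n = a % n :=
      fun a => PySem.Int.mod_eq_emod_of_pos hn
    have hA : ((s - k * r) % n = s) ↔ n ∣ k * r := by
      rw [show s - k * r = s + (-(k * r)) by ring, pvCond n s _ hs0 hsn, dvd_neg]
    have hj : PySem.Int.mod ((s + (k - 1) * r) % n + r) n = (s + k * r) % n := by
      rw [hmod, pvShift, show s + (k - 1) * r + r = s + k * r by ring]
    have hB : ((s + k * r) % n = s) ↔ n ∣ k * r := pvCond n s _ hs0 hsn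
    simp only [pvALoop, pvBLoop, pvGetDest, hj]
    by_cases hdvd : n ∣ k * r
    · rw [if_pos (hA.mpr hdvd), if_pos (hB.mpr hdvd)]
    · rw [if_neg (fun h => hdvd (hA.mp h)), if_neg (fun h => hdvd (hB.mp h))]
      have hnextA : PySem.Int.mod ((s - k * r) % n - r) n = (s - (k + 1) * r) % n := by
        rw [hmod, show (s - k * r) % n - r = (s - k * r) % n + (-r) by ring, pvShift,
          show s - k * r + -r = s - (k + 1) * r by ring]
      rw [hnextA, show s + k * r = s + ((k + 1) - 1) * r by ring]
      exact ih (k + 1) (cnt + 1) _ _ _ (by omega)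

-- ===== VERDICT (by name: the statement is the Claim_ definition above) =====
theorem DoRotationCycle_spec : Claim_equal_DoRotationCycle := by
  intro vector r s _ hpre
  obtain ⟨hs0, hsn⟩ := hpre
  have hn : 0 < (vector.length : Int) := by omega
  unfold Spec_DoRotationCycle
  simp only [DoRotationCycle, DoRotationCycle_alt, pvGetDest]
  have hmod : ∀ a : Int, PySem.Int.mod a (vector.length : Int) = a % (vector.length : Int) :=
    fun a => PySem.Int.mod_eq_emod_of_pos hn
  have h1 : PySem.Int.mod (s - r) (vector.length : Int)
      = (s - 1 * r) % (vector.length : Int) := by rw [hmod]; ring_nf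
  have h2 : s = (s + (1 - 1) * r) % (vector.length : Int) := by
    rw [show (1 - 1 : Int) * r = 0 by ring, add_zero, Int.emod_eq_of_lt hs0 hsn]
  rw [h1]
  have hkey := pvLoop_agree (vector.length : Int) r s hn hs0 hsn vector.length 1 1
    (PySem.List.pySetD vector s (PySem.List.pyGetD vector (pvGetSource s (vector.length : Int) r) 0))
    (PySem.List.pyGetD vector s 0) vector le_rfl
  rw [← h2] at hkey
  exact hkey
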